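-- pv_equiv track=rewrite | github.com/samjd-zz/regulatory-intelligence-assistant | backend/utils/legal_text_parser.py | _build_section_number
-- ===== SOURCE A (Python) =====
-- from typing import List, Dict, Tuple, Optional, Any
--
-- def _build_section_number(groups: Tuple) -> str:
--     """
--     Build section number from regex match groups.
--
--     Args:
--         groups: Regex match groups
--
--     Returns:
--         Formatted section number
--     """
--     # Filter out None values
--     parts = [str(g) for g in groups if g is not None]
--
--     if len(parts) == 1:
--         return parts[0]
--     elif len(parts) == 2:
--         return f"{parts[0]}({parts[1]})"
--     elif len(parts) == 3:
--         return f"{parts[0]}({parts[1]})({parts[2]})"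
--     elif len(parts) >= 4:
--         return f"{parts[0]}({parts[1]})({parts[2]})({parts[3]})"
--
--     return '.'.join(parts)
-- ===== SOURCE B (Python) =====
-- from typing import Tuple
--
-- def _build_section_number(groups: Tuple) -> str:
--     # Single recursive pass over the raw groups: skip Nones inline, emit the
--     # first match verbatim and each later one parenthesized, stop after four.
--     def go(gs, emitted):
--         if not gs or emitted == 4:
--             return ''
--         head, rest = gs[0], gs[1:]
--         if head is None:
--             return go(rest, emitted)
--         piece = str(head) if emitted == 0 else f"({head})"
--         return piece + go(rest, emitted + 1)
--     return go(list(groups), 0)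
-- ===== Notes on version B (the rewrite author's own statement) =====
-- stated objective: alternative
-- what changed: Replaces A's two-stage filter-then-branch-on-length formatting with one recursive pass over the raw groups that skips Nones inline and carries an emitted-count, so no parts list, no length cases and no slicing exist.
import Mathlib
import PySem

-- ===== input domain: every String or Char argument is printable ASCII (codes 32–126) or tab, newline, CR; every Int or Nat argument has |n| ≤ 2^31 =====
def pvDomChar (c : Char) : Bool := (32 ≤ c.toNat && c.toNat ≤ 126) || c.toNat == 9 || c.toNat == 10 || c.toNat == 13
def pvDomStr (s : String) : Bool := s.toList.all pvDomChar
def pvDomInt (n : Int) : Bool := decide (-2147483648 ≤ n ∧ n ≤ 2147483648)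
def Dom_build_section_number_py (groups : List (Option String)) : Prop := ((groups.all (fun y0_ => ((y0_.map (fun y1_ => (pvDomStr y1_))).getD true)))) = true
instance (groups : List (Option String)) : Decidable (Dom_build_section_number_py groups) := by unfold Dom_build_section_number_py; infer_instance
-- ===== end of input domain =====

-- B replaces A's filter-then-branch-on-length formatting by one recursive pass
-- over the raw groups with an emitted-count (alternative decomposition, same cost).


-- ===== PORT A =====
def build_section_number_py (groups : List (Option String)) : String :=
  let parts := groups.filterMap id
  if parts.length == 1 then parts.getD 0 ""
  else if parts.length == 2 then parts.getD 0 "" ++ "(" ++ parts.getD 1 "" ++ ")"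
  else if parts.length == 3 then
    parts.getD 0 "" ++ "(" ++ parts.getD 1 "" ++ ")" ++ "(" ++ parts.getD 2 "" ++ ")"
  else if parts.length ≥ 4 then
    parts.getD 0 "" ++ "(" ++ parts.getD 1 "" ++ ")" ++ "(" ++ parts.getD 2 "" ++ ")" ++ "(" ++ parts.getD 3 "" ++ ")"
  else PySem.Str.join "." parts

-- ===== PORT B =====
-- transliteration of Source B's inner recursive `go`
def build_section_number_go (gs : List (Option String)) (emitted : Nat) : String :=
  match gs with
  | [] => ""
  | head :: rest =>
    if emitted == 4 then ""
    else match head with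
      | none => build_section_number_go rest emitted
      | some h =>
        (if emitted == 0 then h else "(" ++ h ++ ")") ++ build_section_number_go rest (emitted + 1)

def build_section_number_py_alt (groups : List (Option String)) : String :=
  build_section_number_go groups 0

-- ===== PRECONDITION & SPEC =====
def Spec_build_section_number_py (groups : List (Option String)) (out : String) : Prop := out = build_section_number_py_alt groups
instance (groups : List (Option String)) (out : String) : Decidable (Spec_build_section_number_py groups out) := by unfold Spec_build_section_number_py; infer_instance

-- ===== CLAIM (what is proved, stated in full; the proofs are below) =====
def Claim_equal_build_section_number_py : Prop := ∀ (groups : List (Option String)), Dom_build_section_number_py groups → Spec_build_section_number_py groups (build_section_number_py groups)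

-- ===== LEMMAS AND PROOFS =====

-- `go` seen through the filtered list: emit the same pieces from parts
def pvEmit (ps : List String) (emitted : Nat) : String :=
  match ps with
  | [] => ""
  | p :: rest =>
    if emitted == 4 then ""
    else (if emitted == 0 then p else "(" ++ p ++ ")") ++ pvEmit rest (emitted + 1)

theorem emit_four (ps : List String) : pvEmit ps 4 = "" := by
  cases ps <;> simp [pvEmit]

theorem go_eq_emit (gs : List (Option String)) (e : Nat) :
    build_section_number_go gs e = pvEmit (gs.filterMap id) e := by
  induction gs generalizing e with
  | nil => rfl
  | cons head rest ih =>
    cases head with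
    | none =>
      simp [build_section_number_go, ih]
      intro h
      subst h
      exact emit_four _
    | some h => simp [build_section_number_go, pvEmit, ih]

-- ===== VERDICT (by name: the statement is the Claim_ definition above) =====
theorem build_section_number_py_spec : Claim_equal_build_section_number_py := by
  intro groups _
  unfold Spec_build_section_number_py build_section_number_py build_section_number_py_alt
  rw [go_eq_emit]
  match h : groups.filterMap id with
  | [] => simp [PySem.Str.join, pvEmit]
  | [a] => simp [pvEmit]
  | [a, b] => simp [pvEmit, String.append_assoc]
  | [a, b, c] => simp [pvEmit, String.append_assoc]; simp [← String.append_assoc]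
  | a :: b :: c :: d :: rest => simp [pvEmit, emit_four, String.append_assoc]; simp [← String.append_assoc]
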